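-- pv_equiv track=rewrite | github.com/TanMosheng/Condition-identification | condition_count.py | correct_results
-- ===== SOURCE A (Python) =====
-- def correct_results(results, length):
--     for d in range(0, len(results)):
--         if results[d] != 0:
--             continue
--         else:
--             left = results[d - 1]
--             flag = len(results)
--             right = -1
--             for i in range(d + 1, len(results)):
--                 if results[i] != 0:
--                     right = results[i]
--                     flag = i
--                     break
--             if flag != len(results):
--                 if left == right:
--                     for i in range(d, flag):
--                         results[i] = left
--                 else:
--                     for i in range(d, flag):
--                         results[i] = right
--             else:
--                 for i in range(d, flag):
--                     results[i] = left
--     return results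
-- ===== SOURCE B (Python) =====
-- def correct_results(results, length):
--     # Single backward pass with a "nearest nonzero to the right" carry, seeded
--     # with the last nonzero of the whole list so trailing zero runs get it too;
--     # mutates `results` in place (via results[:] = out) like the original.
--     carry = 0
--     for v in results:
--         if v != 0:
--             carry = v
--     out = []
--     for v in reversed(results):
--         if v != 0:
--             carry = v
--         out.append(carry if v == 0 else v)
--     out.reverse()
--     results[:] = out
--     return results
-- ===== Notes on version B (the rewrite author's own statement) =====
-- stated objective: simpler
-- what changed: Replaces the outer index loop with per-zero-run rightward rescans, left/right comparison and in-place segment refills by one pre-pass picking the last nonzero plus a single backward pass carrying the nearest nonzero to the right.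
import Mathlib
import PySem

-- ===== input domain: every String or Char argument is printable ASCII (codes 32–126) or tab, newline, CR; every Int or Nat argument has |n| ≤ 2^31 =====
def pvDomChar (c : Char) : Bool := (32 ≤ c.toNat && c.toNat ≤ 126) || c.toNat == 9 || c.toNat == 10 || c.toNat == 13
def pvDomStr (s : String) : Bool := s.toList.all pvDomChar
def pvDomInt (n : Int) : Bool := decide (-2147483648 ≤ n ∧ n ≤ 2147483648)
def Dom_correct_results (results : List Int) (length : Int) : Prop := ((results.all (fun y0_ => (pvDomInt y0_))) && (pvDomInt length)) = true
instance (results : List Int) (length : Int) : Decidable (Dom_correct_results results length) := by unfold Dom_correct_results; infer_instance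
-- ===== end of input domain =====

-- B replaces A's per-zero-run rescans and refills by one backward carry pass; objective: simpler.
-- Both Pythons mutate `results` in place identically; the theorems are about the return value.

-- ===== PORT A =====
-- inner 'for i in range(d+1, len(results)): … break' scan (right, flag initialised to -1, len)
def pvFindRight (res : List Int) (idxs : List Int) (n : Int) : Int × Int :=
  match idxs with
  | [] => (-1, n)
  | i :: rest =>
      if PySem.List.pyGetD res i 0 ≠ 0 then (PySem.List.pyGetD res i 0, i)
      else pvFindRight res rest n

-- 'for i in range(d, flag): results[i] = v'
def pvFill (res : List Int) (idxs : List Int) (v : Int) : List Int :=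
  idxs.foldl (fun r i => PySem.List.pySetD r i v) res

def pvStepA (res : List Int) (d : Int) : List Int :=
  if PySem.List.pyGetD res d 0 ≠ 0 then res
  else
    let left := PySem.List.pyGetD res (d - 1) 0
    let fr := pvFindRight res (PySem.List.pyRange (d + 1) (res.length : Int) 1) (res.length : Int)
    let right := fr.1
    let flag := fr.2
    if flag ≠ (res.length : Int) then
      if left = right then pvFill res (PySem.List.pyRange d flag 1) left
      else pvFill res (PySem.List.pyRange d flag 1) right
    else pvFill res (PySem.List.pyRange d flag 1) left

def correct_results (results : List Int) (length : Int) : List Int :=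
  (PySem.List.pyRange 0 (results.length : Int) 1).foldl pvStepA results

-- ===== PORT B =====
def correct_results_alt (results : List Int) (length : Int) : List Int :=
  let carry := results.foldl (fun c v => if v ≠ 0 then v else c) 0
  let p := results.reverse.foldl
    (fun (p : Int × List Int) v =>
      let c := if v ≠ 0 then v else p.1
      (c, p.2 ++ [if v = 0 then c else v]))
    (carry, ([] : List Int))
  p.2.reverse

-- ===== PRECONDITION & SPEC =====
def Spec_correct_results (results : List Int) (length : Int) (out : List Int) : Prop := out = correct_results_alt results length
instance (results : List Int) (length : Int) (out : List Int) : Decidable (Spec_correct_results results length out) := by unfold Spec_correct_results; infer_instance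

-- ===== CLAIM (what is proved, stated in full; the proofs are below) =====
def Claim_equal_correct_results : Prop := ∀ (results : List Int) (length : Int), Dom_correct_results results length → Spec_correct_results results length (correct_results results length)

-- ===== LEMMAS AND PROOFS =====

-- first nonzero of the list, else the carry c
def pvFirstNZ : List Int → Int → Int
  | [], c => c
  | v :: t, c => if v ≠ 0 then v else pvFirstNZ t c

-- last nonzero of the list, else the seed a (B's first loop)
def pvLastNZ (xs : List Int) (a : Int) : Int :=
  xs.foldl (fun c v => if v ≠ 0 then v else c) a

-- closed form with an UPDATING carry (what A computes; seed 0)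
def pvFF : List Int → Int → List Int
  | [], _ => []
  | v :: t, c => if v ≠ 0 then v :: pvFF t v else pvFirstNZ t c :: pvFF t c

-- closed form with a CONSTANT carry (what B computes; seed = last nonzero)
def pvGG : List Int → Int → List Int
  | [], _ => []
  | v :: t, c => (if v ≠ 0 then v else pvFirstNZ t c) :: pvGG t c

-- ---- generic reads ----

-- read at a cast-Nat-or-beyond index lands in the right part
theorem pvRead_ge (pre suf : List Int) (i : Int) (h : (pre.length : Int) ≤ i) :
    PySem.List.pyGetD (pre ++ suf) i 0 = suf.getD (i.toNat - pre.length) 0 := by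
  have h0 : 0 ≤ i := le_trans (by positivity) h
  rw [← Int.toNat_of_nonneg h0, PySem.List.pyGetD_natCast]
  exact List.getD_append_right pre suf 0 i.toNat (by omega)

-- read inside a replicate block
theorem pvRead_rep (pre suf : List Int) (m : Nat) (v : Int) (i : Int)
    (h1 : (pre.length : Int) ≤ i) (h2 : i < (pre.length : Int) + m) :
    PySem.List.pyGetD (pre ++ (List.replicate m v ++ suf)) i 0 = v := by
  have hk : i.toNat - pre.length < m := by omega
  rw [pvRead_ge pre _ i h1,
    List.getD_append (List.replicate m v) suf 0 (i.toNat - pre.length)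
      (by simpa using hk)]
  exact List.getD_replicate _ hk

-- read of an all-zero region (zeros up to the end of the list)
theorem pvRead_allzero (pre : List Int) (m : Nat) (i : Int) (h : (pre.length : Int) ≤ i) :
    PySem.List.pyGetD (pre ++ List.replicate m (0:Int)) i 0 = 0 := by
  rw [pvRead_ge pre _ i h]
  rcases lt_or_ge (i.toNat - pre.length) m with hlt | hge
  · rw [List.getD_replicate]; omega
  · rw [List.getD_eq_default]; simpa using hge

-- 'left' read: results[d-1] where d = len(pre), list = pre ++ zeros; equals pre.getLastD 0
theorem pvRead_left (pre : List Int) (m : Nat) (hm : 0 < m) :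
    PySem.List.pyGetD (pre ++ List.replicate m (0:Int)) ((pre.length : Int) - 1) 0
      = pre.getLastD 0 := by
  rcases List.eq_nil_or_concat pre with rfl | ⟨q, x, rfl⟩
  · simp only [List.nil_append, List.length_nil, Int.natCast_zero, zero_sub]
    rw [PySem.List.pyGetD_neg_ofNat _ 1 0 (by omega) (by simp; omega)]
    simp
  · simp only [List.concat_eq_append]
    have hidx : (((q ++ [x]).length : Nat) : Int) - 1 = ((q.length : Nat) : Int) := by
      simp
    rw [hidx, List.append_assoc, List.singleton_append, pvRead_ge q _ _ (le_refl _)]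
    simp [List.getLastD_concat]

-- set at the junction
theorem pvSet_mid (pre suf : List Int) (x v : Int) :
    PySem.List.pySetD (pre ++ x :: suf) (pre.length : Int) v = pre ++ v :: suf := by
  rw [PySem.List.pySetD_natCast]; simp

-- ---- findRight ----

theorem pvFindRight_all (res idxs : List Int) (n : Int)
    (h : ∀ i ∈ idxs, PySem.List.pyGetD res i 0 = 0) :
    pvFindRight res idxs n = (-1, n) := by
  induction idxs with
  | nil => rfl
  | cons i rest ih =>
      simp only [pvFindRight, h i (by simp), ne_eq, not_true_eq_false, reduceIte,
        not_not, if_pos rfl]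
      · exact ih fun j hj => h j (by simp [hj])

theorem pvFindRight_hit (j : Nat) : ∀ (pre t' : List Int) (v : Int), v ≠ 0 →
    ∀ (b n : Int), ((pre.length + j : Nat) : Int) < b →
    pvFindRight (pre ++ (List.replicate j 0 ++ v :: t'))
        (PySem.List.pyRange (pre.length : Int) b 1) n
      = (v, ((pre.length + j : Nat) : Int)) := by
  induction j with
  | zero =>
      intro pre t' v hv b n hb
      rw [PySem.List.pyRange_one_cons (by push_cast at hb ⊢; omega)]
      have hr : PySem.List.pyGetD (pre ++ (List.replicate 0 0 ++ v :: t'))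
          ((pre.length : Int)) 0 = v := by
        simpa using pvRead_ge pre (v :: t') _ (le_refl _)
      simp only [pvFindRight, hr]
      simp [hv]
  | succ j ih =>
      intro pre t' v hv b n hb
      rw [PySem.List.pyRange_one_cons (by push_cast at hb ⊢; omega)]
      have hr : PySem.List.pyGetD (pre ++ (List.replicate (j+1) 0 ++ v :: t'))
          ((pre.length : Int)) 0 = 0 :=
        pvRead_rep pre (v :: t') (j+1) 0 _ (le_refl _) (by push_cast; omega)
      simp only [pvFindRight, hr, ne_eq, not_true_eq_false, reduceIte]
      have hres : pre ++ (List.replicate (j+1) 0 ++ v :: t')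
          = (pre ++ [0]) ++ (List.replicate j 0 ++ v :: t') := by
        simp [List.replicate_succ]
      have hidx : (pre.length : Int) + 1 = (((pre ++ [0]).length : Nat) : Int) := by simp
      rw [hres, hidx, ih (pre ++ [0]) t' v hv b n (by simp; push_cast at hb ⊢; omega)]
      have : (((pre ++ [0]).length + j : Nat) : Int) = ((pre.length + (j+1) : Nat) : Int) := by
        simp; push_cast; omega
      rw [this]

-- ---- fill ----

theorem pvFill_block (mid : List Int) : ∀ (pre suf : List Int) (v : Int),
    pvFill (pre ++ (mid ++ suf))
        (PySem.List.pyRange (pre.length : Int) ((pre.length : Int) + mid.length) 1) v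
      = pre ++ (List.replicate mid.length v ++ suf) := by
  induction mid with
  | nil =>
      intro pre suf v
      rw [show ((pre.length : Int) + ([] : List Int).length) = (pre.length : Int) by simp,
        PySem.List.pyRange_one_eq_nil (le_refl _)]
      simp [pvFill]
  | cons x mid ih =>
      intro pre suf v
      rw [PySem.List.pyRange_one_cons (by push_cast [List.length_cons]; omega)]
      simp only [pvFill, List.foldl_cons] at ih ⊢
      rw [show pre ++ ((x :: mid) ++ suf) = pre ++ x :: (mid ++ suf) by simp,
        pvSet_mid pre (mid ++ suf) x v,
        show pre ++ v :: (mid ++ suf) = (pre ++ [v]) ++ (mid ++ suf) by simp,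
        show (pre.length : Int) + 1 = (((pre ++ [v]).length : Nat) : Int) by simp,
        show ((pre.length : Int)) + ((x :: mid).length : Nat)
            = (((pre ++ [v]).length : Nat) : Int) + (mid.length : Nat) by
          push_cast [List.length_cons, List.length_append, List.length_nil]
          omega,
        ih (pre ++ [v]) suf v]
      simp [List.replicate_succ]

-- ---- loop no-ops ----

theorem pvSkip (idxs : List Int) (res : List Int)
    (h : ∀ i ∈ idxs, PySem.List.pyGetD res i 0 ≠ 0) :
    idxs.foldl pvStepA res = res := by
  induction idxs with
  | nil => rfl
  | cons i rest ih =>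
      simp only [List.foldl_cons, pvStepA, h i (by simp), ne_eq, not_false_eq_true, reduceIte]
      exact ih fun j hj => h j (by simp [hj])

theorem pvStep_zeros (pre : List Int) (m : Nat) (i : Int)
    (h1 : (pre.length : Int) + 1 ≤ i) (h2 : i < (pre.length : Int) + m) :
    pvStepA (pre ++ List.replicate m (0:Int)) i = pre ++ List.replicate m (0:Int) := by
  have hread : PySem.List.pyGetD (pre ++ List.replicate m (0:Int)) i 0 = 0 :=
    pvRead_allzero pre m i (by omega)
  have hleft : PySem.List.pyGetD (pre ++ List.replicate m (0:Int)) (i - 1) 0 = 0 :=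
    pvRead_allzero pre m (i - 1) (by omega)
  have hfr : pvFindRight (pre ++ List.replicate m (0:Int))
      (PySem.List.pyRange (i + 1) (((pre ++ List.replicate m (0:Int)).length : Nat) : Int) 1)
      (((pre ++ List.replicate m (0:Int)).length : Nat) : Int)
      = (-1, (((pre ++ List.replicate m (0:Int)).length : Nat) : Int)) := by
    refine pvFindRight_all _ _ _ (fun idx hidx => pvRead_allzero pre m idx ?_)
    have := (PySem.List.mem_pyRange_one.1 hidx).1
    omega
  simp only [pvStepA, hread, hleft, hfr, ne_eq, not_true_eq_false, reduceIte,
    not_false_eq_true]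
  have hk1 : i = (((pre.length + (i.toNat - pre.length) : Nat) : Nat) : Int) := by omega
  have hsplit : pre ++ List.replicate m (0:Int)
      = (pre ++ List.replicate (i.toNat - pre.length) 0)
        ++ (List.replicate (m - (i.toNat - pre.length)) (0:Int) ++ []) := by
    simp only [List.append_assoc, List.append_nil, ← List.replicate_add]
    congr 2
    omega
  have hlen : (((pre ++ List.replicate m (0:Int)).length : Nat) : Int)
      = (((pre ++ List.replicate (i.toNat - pre.length) 0).length : Nat) : Int)
        + ((m - (i.toNat - pre.length) : Nat) : Int) := by
    push_cast [List.length_append, List.length_replicate]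
    omega
  have hi : i = (((pre ++ List.replicate (i.toNat - pre.length) 0).length : Nat) : Int) := by
    push_cast [List.length_append, List.length_replicate]
    omega
  have hfill := pvFill_block (List.replicate (m - (i.toNat - pre.length)) (0:Int))
    (pre ++ List.replicate (i.toNat - pre.length) 0) [] 0
  rw [List.length_replicate, ← hsplit, ← hi] at hfill
  have hlen2 : (((pre ++ List.replicate m (0:Int)).length : Nat) : Int)
      = i + ((m - (i.toNat - pre.length) : Nat) : Int) := by
    push_cast [List.length_append, List.length_replicate]
    omega
  rw [← hlen2] at hfill
  rw [hfill]

theorem pvTrailing (idxs : List Int) (pre : List Int) (m : Nat) (c : Int)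
    (h : ∀ i ∈ idxs, (pre.length : Int) + 1 ≤ i ∧ i < (pre.length : Int) + m) :
    idxs.foldl pvStepA (pre ++ List.replicate m c) = pre ++ List.replicate m c := by
  induction idxs with
  | nil => rfl
  | cons i rest ih =>
      have hi := h i (by simp)
      have hstep : pvStepA (pre ++ List.replicate m c) i = pre ++ List.replicate m c := by
        by_cases hc : c = 0
        · subst hc; exact pvStep_zeros pre m i hi.1 hi.2
        · have hread : PySem.List.pyGetD (pre ++ List.replicate m c) i 0 = c := by
            rw [show pre ++ List.replicate m c = pre ++ (List.replicate m c ++ []) by simp]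
            exact pvRead_rep pre [] m c i (by omega) (by omega)
          simp only [pvStepA, hread, ne_eq, hc, not_false_eq_true, reduceIte]
      rw [List.foldl_cons, hstep]
      exact ih (fun j hj => h j (by simp [hj]))

-- ---- decomposition of a list into leading zeros + first nonzero ----

theorem pvDecomp (t : List Int) :
    (∃ m, t = List.replicate m 0) ∨
      ∃ j v t', v ≠ 0 ∧ t = List.replicate j 0 ++ v :: t' := by
  induction t with
  | nil => exact Or.inl ⟨0, rfl⟩
  | cons v t ih =>
      by_cases hv : v = 0
      · subst hv
        rcases ih with ⟨m, rfl⟩ | ⟨j, w, t', hw, rfl⟩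
        · exact Or.inl ⟨m + 1, by simp [List.replicate_succ]⟩
        · exact Or.inr ⟨j + 1, w, t', hw, by simp [List.replicate_succ]⟩
      · exact Or.inr ⟨0, v, t, hv, rfl⟩

-- ---- facts about the closed forms ----

theorem pvFirstNZ_hit (j : Nat) (v : Int) (hv : v ≠ 0) (t' : List Int) (c : Int) :
    pvFirstNZ (List.replicate j 0 ++ v :: t') c = v := by
  induction j with
  | zero => simp [pvFirstNZ, hv]
  | succ j ih => simpa [List.replicate_succ, pvFirstNZ] using ih

theorem pvFirstNZ_zeros (m : Nat) (c : Int) : pvFirstNZ (List.replicate m 0) c = c := by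
  induction m with
  | zero => rfl
  | succ m ih => simpa [List.replicate_succ, pvFirstNZ] using ih

theorem pvFF_zeros (m : Nat) (c : Int) : pvFF (List.replicate m 0) c = List.replicate m c := by
  induction m with
  | zero => rfl
  | succ m ih => simp [List.replicate_succ, pvFF, pvFirstNZ_zeros, ih]

theorem pvFF_hit (j : Nat) (v : Int) (hv : v ≠ 0) (t' : List Int) (c : Int) :
    pvFF (List.replicate j 0 ++ v :: t') c = List.replicate j v ++ v :: pvFF t' v := by
  induction j with
  | zero => simp [pvFF, hv]
  | succ j ih =>
      simp [List.replicate_succ, pvFF, pvFirstNZ_hit j v hv, ih]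

-- ---- MAIN LEMMA: A's loop, started after a finished prefix ----

-- one A-step at the start of an all-zero suffix: fills it with pre.getLastD 0
theorem pvStep_tail (pre : List Int) (m : Nat) :
    pvStepA (pre ++ List.replicate (m+1) (0:Int)) ((pre.length : Nat) : Int)
      = pre ++ List.replicate (m+1) (pre.getLastD 0) := by
  have hread : PySem.List.pyGetD (pre ++ List.replicate (m+1) (0:Int)) ((pre.length : Nat)) 0 = 0 :=
    pvRead_allzero pre (m+1) _ (le_refl _)
  have hleft := pvRead_left pre (m+1) (by omega)
  have hfr : pvFindRight (pre ++ List.replicate (m+1) (0:Int))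
      (PySem.List.pyRange (((pre.length : Nat) : Int) + 1)
        (((pre ++ List.replicate (m+1) (0:Int)).length : Nat) : Int) 1)
      (((pre ++ List.replicate (m+1) (0:Int)).length : Nat) : Int)
      = (-1, (((pre ++ List.replicate (m+1) (0:Int)).length : Nat) : Int)) := by
    refine pvFindRight_all _ _ _ (fun idx hidx => pvRead_allzero pre (m+1) idx ?_)
    have := (PySem.List.mem_pyRange_one.1 hidx).1
    omega
  have hfill := pvFill_block (List.replicate (m+1) (0:Int)) pre [] (pre.getLastD 0)
  rw [List.length_replicate, List.append_nil, List.append_nil] at hfill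
  have hlen : (((pre ++ List.replicate (m+1) (0:Int)).length : Nat) : Int)
      = ((pre.length : Nat) : Int) + ((m+1 : Nat) : Int) := by
    push_cast [List.length_append, List.length_replicate]; omega
  simp only [pvStepA, hread, hleft, hfr, ne_eq, not_true_eq_false, reduceIte]
  rw [hlen, hfill]

-- one A-step at the start of a zero run followed by a nonzero w: fills the run with w
theorem pvStep_run (pre t' : List Int) (j : Nat) (w : Int) (hw : w ≠ 0) :
    pvStepA (pre ++ (List.replicate (j+1) 0 ++ w :: t')) ((pre.length : Nat) : Int)
      = pre ++ (List.replicate (j+1) w ++ w :: t') := by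
  have hread : PySem.List.pyGetD (pre ++ (List.replicate (j+1) 0 ++ w :: t'))
      ((pre.length : Nat)) 0 = 0 :=
    pvRead_rep pre (w :: t') (j+1) 0 _ (le_refl _) (by push_cast; omega)
  have hres : pre ++ (List.replicate (j+1) 0 ++ w :: t')
      = (pre ++ [0]) ++ (List.replicate j 0 ++ w :: t') := by
    simp [List.replicate_succ]
  have hlen : (((pre ++ (List.replicate (j+1) 0 ++ w :: t')).length : Nat) : Int)
      = ((pre.length : Nat) : Int) + ((j+1 : Nat) : Int) + 1 + t'.length := by
    simp only [List.length_append, List.length_replicate, List.length_cons]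
    push_cast; omega
  have hfr : pvFindRight (pre ++ (List.replicate (j+1) 0 ++ w :: t'))
      (PySem.List.pyRange (((pre.length : Nat) : Int) + 1)
        (((pre ++ (List.replicate (j+1) 0 ++ w :: t')).length : Nat) : Int) 1)
      (((pre ++ (List.replicate (j+1) 0 ++ w :: t')).length : Nat) : Int)
      = (w, (((pre ++ [0]).length + j : Nat) : Int)) := by
    rw [show (((pre.length : Nat) : Int) + 1) = (((pre ++ [0]).length : Nat) : Int) by simp]
    conv_lhs => rw [hres]
    exact pvFindRight_hit j (pre ++ [0]) t' w hw _ _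
      (by rw [← hres, hlen]
          simp only [List.length_append, List.length_cons, List.length_nil]
          push_cast; omega)
  have hflag : (((pre ++ [0]).length + j : Nat) : Int)
      ≠ (((pre ++ (List.replicate (j+1) 0 ++ w :: t')).length : Nat) : Int) := by
    rw [hlen]
    simp only [List.length_append, List.length_cons, List.length_nil]
    push_cast; omega
  have hfill := pvFill_block (List.replicate (j+1) (0:Int)) pre (w :: t') w
  rw [List.length_replicate] at hfill
  have hrange : (((pre ++ [0]).length + j : Nat) : Int)
      = ((pre.length : Nat) : Int) + ((j+1 : Nat) : Int) := by
    simp only [List.length_append, List.length_cons, List.length_nil]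
    push_cast; omega
  simp only [pvStepA, hread, hfr, ne_eq, not_true_eq_false, reduceIte]
  rw [if_pos hflag]
  by_cases hlr : PySem.List.pyGetD (pre ++ (List.replicate (j+1) 0 ++ w :: t'))
      (((pre.length : Nat) : Int) - 1) 0 = w
  · rw [if_pos hlr, hlr, hrange, hfill]
  · rw [if_neg hlr, hrange, hfill]

theorem pvMain (L : Nat) : ∀ (rest pre : List Int), rest.length = L →
    (PySem.List.pyRange (pre.length : Int) ((pre.length + rest.length : Nat) : Int) 1).foldl
        pvStepA (pre ++ rest)
      = pre ++ pvFF rest (pre.getLastD 0) := by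
  induction L using Nat.strong_induction_on with
  | _ L ih =>
  intro rest pre hL
  rcases rest with _ | ⟨v, t⟩
  · rw [show ((pre.length + ([] : List Int).length : Nat) : Int) = (pre.length : Int) by simp,
      PySem.List.pyRange_one_eq_nil (le_refl _)]
    simp [pvFF]
  · by_cases hv : v = 0
    · subst hv
      rcases pvDecomp t with ⟨m, rfl⟩ | ⟨j, w, t', hw, rfl⟩
      · -- all zeros to the end
        rw [show (0:Int) :: List.replicate m (0:Int) = List.replicate (m+1) 0 by
          rw [List.replicate_succ]] at hL ⊢
        rw [PySem.List.pyRange_one_cons (by push_cast [List.length_replicate]; omega),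
          List.foldl_cons, pvStep_tail pre m]
        rw [show ((pre.length + (List.replicate (m+1) (0:Int)).length : Nat) : Int)
            = (pre.length : Int) + (m+1 : Nat) by push_cast [List.length_replicate]; omega]
        rw [pvTrailing _ pre (m+1) (pre.getLastD 0) (fun i hi => by
          have h1 := (PySem.List.mem_pyRange_one.1 hi).1
          have h2 := (PySem.List.mem_pyRange_one.1 hi).2
          push_cast at h1 h2 ⊢; omega)]
        rw [pvFF_zeros]
      · -- zero run then a nonzero w
        rw [show (0:Int) :: (List.replicate j (0:Int) ++ w :: t')
            = List.replicate (j+1) 0 ++ w :: t' by simp [List.replicate_succ]] at hL ⊢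
        rw [PySem.List.pyRange_one_cons
            (by push_cast [List.length_append, List.length_replicate, List.length_cons]; omega),
          List.foldl_cons, pvStep_run pre t' j w hw]
        -- split the remaining range at flag = pre.length + (j+1)
        have hsplit := PySem.List.pyRange_one_append ((pre.length : Int) + 1)
          ((pre.length : Int) + ((j+1 : Nat) : Int))
          ((pre.length + (List.replicate (j+1) (0:Int) ++ w :: t').length : Nat) : Int)
          (by push_cast; omega)
          (by push_cast [List.length_append, List.length_replicate, List.length_cons]; omega)
        rw [hsplit, List.foldl_append]
        -- skip over the just-filled positions
        rw [pvSkip (PySem.List.pyRange ((pre.length : Int) + 1)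
            ((pre.length : Int) + ((j+1 : Nat) : Int)) 1)
          (pre ++ (List.replicate (j+1) w ++ w :: t')) (fun i hi => by
          have h1 := (PySem.List.mem_pyRange_one.1 hi).1
          have h2 := (PySem.List.mem_pyRange_one.1 hi).2
          rw [pvRead_rep pre (w :: t') (j+1) w i (by omega) (by push_cast at h2 ⊢; omega)]
          exact hw)]
        -- finish with the induction hypothesis on w :: t'
        have harr : pre ++ (List.replicate (j+1) w ++ w :: t')
            = (pre ++ List.replicate (j+1) w) ++ (w :: t') := by simp
        have hlast : (pre ++ List.replicate (j+1) w).getLastD 0 = w := by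
          rw [show pre ++ List.replicate (j+1) w
              = (pre ++ List.replicate j w) ++ [w] by simp [List.replicate_succ']]
          exact List.getLastD_concat
        have hih := ih (t'.length + 1) (by simp at hL; omega) (w :: t')
          (pre ++ List.replicate (j+1) w) (by simp)
        rw [hlast] at hih
        rw [show (pre.length : Int) + ((j+1 : Nat) : Int)
            = (((pre ++ List.replicate (j+1) w).length : Nat) : Int) by
          push_cast [List.length_append, List.length_replicate]; omega,
          show ((pre.length + (List.replicate (j+1) (0:Int) ++ w :: t').length : Nat) : Int)
            = (((pre ++ List.replicate (j+1) w).length + (w :: t').length : Nat) : Int) by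
          push_cast [List.length_append, List.length_replicate, List.length_cons]; omega,
          harr, hih]
        rw [pvFF_hit (j+1) w hw t' (pre.getLastD 0)]
        simp [pvFF, hw]
    · -- nonzero head: the step is a no-op, move it into the prefix
      rw [PySem.List.pyRange_one_cons (by push_cast [List.length_cons]; omega),
        List.foldl_cons]
      have hread : PySem.List.pyGetD (pre ++ v :: t) ((pre.length : Nat)) 0 = v := by
        have := pvRead_ge pre (v :: t) (pre.length : Int) (le_refl _)
        simpa using this
      rw [show pvStepA (pre ++ v :: t) ((pre.length : Nat) : Int) = pre ++ v :: t by
        simp only [pvStepA, hread, ne_eq, hv, not_false_eq_true, reduceIte]]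
      have hih := ih t.length (by simp at hL; omega) t (pre ++ [v]) rfl
      rw [List.getLastD_concat] at hih
      rw [show pre ++ v :: t = (pre ++ [v]) ++ t by simp,
        show (pre.length : Int) + 1 = (((pre ++ [v]).length : Nat) : Int) by simp,
        show ((pre.length + (v :: t).length : Nat) : Int)
          = (((pre ++ [v]).length + t.length : Nat) : Int) by
        push_cast [List.length_append, List.length_cons, List.length_nil]; omega,
        hih]
      simp [pvFF, hv]

-- ---- B's side ----

theorem pvRevFold (xs : List Int) : ∀ (c : Int) (acc : List Int),
    xs.reverse.foldl
        (fun (p : Int × List Int) v =>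
          let c := if v ≠ 0 then v else p.1
          (c, p.2 ++ [if v = 0 then c else v]))
        (c, acc)
      = (pvFirstNZ xs c, acc ++ (pvGG xs c).reverse) := by
  induction xs with
  | nil => simp [pvFirstNZ, pvGG]
  | cons v t ih =>
      intro c acc
      rw [List.reverse_cons, List.foldl_append, ih c acc]
      simp only [List.foldl_cons, List.foldl_nil]
      by_cases hv : v = 0 <;>
        simp [pvFirstNZ, pvGG, hv]

theorem pvB_eq_GG (xs : List Int) (L : Int) :
    correct_results_alt xs L = pvGG xs (pvLastNZ xs 0) := by
  simp only [correct_results_alt, pvLastNZ, pvRevFold]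
  simp

theorem pvFirstNZ_lastNZ (t : List Int) : ∀ a : Int,
    pvFirstNZ t (pvLastNZ t a) = pvFirstNZ t a := by
  induction t with
  | nil => intro a; rfl
  | cons w s ih =>
      intro a
      by_cases hw : w = 0 <;> simp [pvFirstNZ, pvLastNZ, hw, List.foldl_cons] at ih ⊢
      · exact ih a

theorem pvFF_eq_GG (xs : List Int) : ∀ a : Int, pvFF xs a = pvGG xs (pvLastNZ xs a) := by
  induction xs with
  | nil => intro a; rfl
  | cons v t ih =>
      intro a
      by_cases hv : v = 0
      · subst hv
        have hL : pvLastNZ ((0:Int) :: t) a = pvLastNZ t a := by simp [pvLastNZ]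
        rw [show pvFF ((0:Int) :: t) a = pvFirstNZ t a :: pvFF t a from by simp [pvFF],
          show pvGG ((0:Int) :: t) (pvLastNZ ((0:Int) :: t) a)
              = pvFirstNZ t (pvLastNZ ((0:Int) :: t) a)
                :: pvGG t (pvLastNZ ((0:Int) :: t) a) from by simp [pvGG],
          hL, pvFirstNZ_lastNZ, ih]
      · simp [pvFF, pvGG, pvLastNZ, List.foldl_cons, hv, ih]


-- ===== VERDICT (by name: the statement is the Claim_ definition above) =====
theorem correct_results_spec : Claim_equal_correct_results := by
  unfold Claim_equal_correct_results
  intro results length _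
  unfold Spec_correct_results
  have h := pvMain results.length results [] rfl
  simp only [List.nil_append, List.length_nil, Nat.cast_zero, Nat.zero_add,
    List.getLastD_nil] at h
  unfold correct_results
  rw [h, pvB_eq_GG, ← pvFF_eq_GG]
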